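-- pv_equiv track=rewrite | github.com/ejin700/hombasis-gnn | pact/pact/labeled/planner.py | find_join_path
-- ===== SOURCE A (Python) =====
-- def find_join_path(con_cover_map):
--     path = []
--     cur_vars = set()
--     working_map = dict(con_cover_map)
--
--     start = list(working_map.keys())[0]
--     path.append(start)
--     cur_vars = set(working_map[start])
--     del working_map[start]
--
--     while len(working_map) > 0:
--         next_en, next_e = None, None
--         for en, e in working_map.items():
--             if cur_vars.intersection(set(e)) != set():
--                 next_en, next_e = en, e
--                 break
--         # for safety, actually impossible if cover is connected
--         assert (next_en is not None and next_e is not None)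
--         path.append(next_en)
--         cur_vars = cur_vars.union(set(next_e))
--         del working_map[en]
--     return path
-- ===== SOURCE B (Python) =====
-- def find_join_path(con_cover_map):
--     # Build a var -> positions index once and mark edges 'ready' as their
--     # variables get absorbed; each step takes the smallest ready position
--     # (found by scanning from a low-water mark), instead of rescanning all
--     # remaining edges with set intersections.
--     items = list(dict(con_cover_map).items())
--     n = len(items)
--     var2pos = {}
--     for i, (_, e) in enumerate(items):
--         for v in e:
--             var2pos.setdefault(v, []).append(i)
--
--     UNTOUCHED, READY, DONE = 0, 1, 2
--     state = [UNTOUCHED] * n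
--     state[0] = DONE
--     seen = set()
--     lo = n  # every ready position is >= lo
--
--     def absorb(i):
--         nonlocal lo
--         for v in items[i][1]:
--             if v not in seen:
--                 seen.add(v)
--                 for p in var2pos[v]:
--                     if state[p] == UNTOUCHED:
--                         state[p] = READY
--                         if p < lo:
--                             lo = p
--
--     path = [items[0][0]]
--     absorb(0)
--     for _ in range(n - 1):
--         j = lo
--         while state[j] != READY:
--             j += 1
--         state[j] = DONE
--         lo = j + 1
--         path.append(items[j][0])
--         absorb(j)
--     return path
-- ===== Notes on version B (the rewrite author's own statement) =====
-- stated objective: faster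
-- what changed: A rescans the whole remaining dict every step testing set intersections; B builds a var->positions index once and marks edges ready as their variables are absorbed, each step picking the smallest ready position via a low-water-mark scan, so the per-step intersection scans over all remaining edges disappear. Pre_ excludes the empty map (A: IndexError) and covers not connected from the first key (A: AssertionError).
import Mathlib
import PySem

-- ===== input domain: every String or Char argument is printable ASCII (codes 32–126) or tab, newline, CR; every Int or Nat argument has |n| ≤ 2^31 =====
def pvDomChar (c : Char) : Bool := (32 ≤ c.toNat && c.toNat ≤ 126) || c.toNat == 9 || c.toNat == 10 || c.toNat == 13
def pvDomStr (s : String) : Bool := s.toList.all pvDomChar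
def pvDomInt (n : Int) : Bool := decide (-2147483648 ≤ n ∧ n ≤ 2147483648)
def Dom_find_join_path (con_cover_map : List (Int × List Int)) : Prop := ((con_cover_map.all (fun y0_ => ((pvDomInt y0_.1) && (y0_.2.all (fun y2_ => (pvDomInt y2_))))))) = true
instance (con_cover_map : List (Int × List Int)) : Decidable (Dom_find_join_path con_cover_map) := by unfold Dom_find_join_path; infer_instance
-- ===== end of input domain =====

-- B replaces A's per-step rescan of the remaining dict (set intersections against every
-- remaining edge) by a var->positions index built once plus a ready-marking state array from
-- which the smallest ready position is taken each step (low-water-mark scan); same return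
-- value on all inputs where A returns.


-- ===== PORT A =====

-- 'cur_vars.intersection(set(e)) != set()'
def fjpShares (cur : PySem.Set Int) (e : List Int) : Bool :=
  !(PySem.Set.equal (PySem.Set.inter cur (PySem.Set.ofList e)) PySem.Set.empty)

-- the 'for en, e in working_map.items(): if …: break' scan
def fjpFind (cur : PySem.Set Int) : List (Int × List Int) → Option (Int × List Int)
  | [] => none
  | (en, e) :: rest => if fjpShares cur e then some (en, e) else fjpFind cur rest

-- the while-loop; fuel = number of remaining entries (each iteration deletes exactly one)
def fjpLoopA : Nat → PySem.Dict Int (List Int) → PySem.Set Int → List Int → List Int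
  | 0, _, _, path => path
  | fuel + 1, working, cur, path =>
    if working.size = 0 then path
    else
      match fjpFind cur working.items with
      | none => path  -- Python: AssertionError (excluded by Pre_)
      | some (en, e) =>
          fjpLoopA fuel (working.erase en)
            (PySem.Set.union cur (PySem.Set.ofList e)) (path ++ [en])

def find_join_path (con_cover_map : List (Int × List Int)) : List Int :=
  let working := PySem.Dict.ofList con_cover_map
  match working.keys with
  | [] => []  -- Python: IndexError on list(working_map.keys())[0] (excluded by Pre_)
  | start :: _ =>
    match working.get? start with
    | none => []  -- unreachable: start is a key of working
    | some vs =>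
        fjpLoopA (working.erase start).size (working.erase start)
          (PySem.Set.ofList vs) [start]

-- ===== PORT B =====

-- var2pos: for i, (_, e) in enumerate(items): for v in e: var2pos.setdefault(v, []).append(i)
def fjpBuildIdx (items : List (Int × List Int)) : PySem.Dict Int (List Nat) :=
  (List.range items.length).foldl
    (fun d i => ((items.getD i (0, [])).2).foldl
      (fun d v => d.modify v [] (· ++ [i])) d)
    PySem.Dict.empty

-- absorb(i): add edge i's new vars to seen; mark their untouched positions READY,
-- lowering the low-water mark lo (positions from var2pos are < n, so getD/set are exact)
def fjpAbsorb (v2p : PySem.Dict Int (List Nat)) (items : List (Int × List Int))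
    (sr : PySem.Set Int × List Nat × Nat) (i : Nat) :
    PySem.Set Int × List Nat × Nat :=
  ((items.getD i (0, [])).2).foldl
    (fun sr v =>
      if PySem.Set.contains sr.1 v then sr
      else
        (PySem.Set.add sr.1 v,
         (v2p.getD v []).foldl
           (fun sl p =>
             if sl.1.getD p 0 = 0 then (sl.1.set p 1, if p < sl.2 then p else sl.2) else sl)
           sr.2))
    sr

-- 'j = lo; while state[j] != READY: j += 1'
def fjpScan (state : List Nat) (j : Nat) : Option Nat :=
  if h : j < state.length then
    if state.getD j 0 = 1 then some j else fjpScan state (j + 1)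
  else none  -- Python: IndexError when j runs past the end (excluded by Pre_)
termination_by state.length - j
decreasing_by omega

-- 'for _ in range(n - 1)' main loop; state: 0 = untouched, 1 = ready, 2 = done
def fjpLoopB (v2p : PySem.Dict Int (List Nat)) (items : List (Int × List Int)) :
    Nat → PySem.Set Int → List Nat → Nat → List Int → List Int
  | 0, _, _, _, path => path
  | k + 1, seen, state, lo, path =>
    match fjpScan state lo with
    | none => path  -- Python: IndexError (excluded by Pre_)
    | some j =>
        let state' := state.set j 2
        let path' := path ++ [(items.getD j (0, [])).1]
        let sr := fjpAbsorb v2p items (seen, state', j + 1) j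
        fjpLoopB v2p items k sr.1 sr.2.1 sr.2.2 path'

def find_join_path_alt (con_cover_map : List (Int × List Int)) : List Int :=
  let items := (PySem.Dict.ofList con_cover_map).items
  match items with
  | [] => []  -- Python: IndexError on items[0] (excluded by Pre_)
  | (k0, _) :: _ =>
    let n := items.length
    let v2p := fjpBuildIdx items
    let state := (List.replicate n 0).set 0 2
    let sr := fjpAbsorb v2p items (PySem.Set.empty, state, n) 0
    fjpLoopB v2p items (n - 1) sr.1 sr.2.1 sr.2.2 [k0]

-- ===== PRECONDITION & SPEC =====
-- Pre_ excludes the empty list (A: IndexError) and covers whose edge-intersection graph is not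
-- connected from the first key (A: AssertionError from the 'assert'); exactly where A returns.
def Pre_find_join_path (con_cover_map : List (Int × List Int)) : Prop :=
  con_cover_map ≠ [] ∧
  ∀ S ∈ ((PySem.Dict.ofList con_cover_map).keys).sublists,
    ((PySem.Dict.ofList con_cover_map).keys).headD 0 ∈ S →
    (∀ p ∈ (PySem.Dict.ofList con_cover_map).items,
     ∀ q ∈ (PySem.Dict.ofList con_cover_map).items,
       q.1 ∈ S → (∃ v ∈ p.2, v ∈ q.2) → p.1 ∈ S) →
    ∀ k ∈ (PySem.Dict.ofList con_cover_map).keys, k ∈ S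
instance (con_cover_map : List (Int × List Int)) : Decidable (Pre_find_join_path con_cover_map) := by
  unfold Pre_find_join_path; infer_instance

def pvWitness_find_join_path : (List (Int × List Int)) := [(1, [1, 2]), (2, [2, 3])]

def Spec_find_join_path (con_cover_map : List (Int × List Int)) (out : List Int) : Prop := out = find_join_path_alt con_cover_map
instance (con_cover_map : List (Int × List Int)) (out : List Int) : Decidable (Spec_find_join_path con_cover_map out) := by unfold Spec_find_join_path; infer_instance

-- ===== CLAIM (what is proved, stated in full; the proofs are below) =====
def Claim_equal_find_join_path : Prop := ∀ (con_cover_map : List (Int × List Int)), Dom_find_join_path con_cover_map → Pre_find_join_path con_cover_map → Spec_find_join_path con_cover_map (find_join_path con_cover_map)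

-- ===== LEMMAS AND PROOFS =====

-- remaining entries of d under a deletion mask u (proof-side view of A's working dict)
def fjpRem : List (Int × List Int) → (Nat → Bool) → List (Int × List Int)
  | [], _ => []
  | x :: t, u => (if u 0 then [] else [x]) ++ fjpRem t (fun j => u (j + 1))

-- index of the first unmasked entry satisfying p (proof-side view of A's scan)
def fjpFirstIdx : List (Int × List Int) → (Nat → Bool) → (List Int → Bool) → Option Nat
  | [], _, _ => none
  | x :: t, u, p =>
      if u 0 = false ∧ p x.2 = true then some 0
      else (fjpFirstIdx t (fun j => u (j + 1)) p).map Nat.succ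

lemma fjpShares_iff (cur : PySem.Set Int) (e : List Int) :
    fjpShares cur e = true ↔ ∃ v, v ∈ e ∧ v ∈ cur := by
  rw [fjpShares, Bool.not_eq_true', ← Bool.not_eq_true, PySem.Set.equal_iff]
  simp [PySem.Set.mem_inter, PySem.Set.mem_ofList]
  tauto

lemma fjpRem_mem {d : List (Int × List Int)} {u : Nat → Bool} {p : Int × List Int}
    (h : p ∈ fjpRem d u) : p ∈ d := by
  induction d generalizing u with
  | nil => simp [fjpRem] at h
  | cons x t ih =>
    rw [fjpRem] at h
    rcases List.mem_append.1 h with h | h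
    · split at h <;> simp_all
    · exact List.mem_cons_of_mem _ (ih h)

lemma fjpRem_false (d : List (Int × List Int)) : fjpRem d (fun _ => false) = d := by
  induction d with
  | nil => rfl
  | cons x t ih => rw [fjpRem]; simpa using ih

lemma fjpRem_congr {d : List (Int × List Int)} {u u' : Nat → Bool}
    (h : ∀ i, u i = u' i) : fjpRem d u = fjpRem d u' := by
  induction d generalizing u u' with
  | nil => rfl
  | cons x t ih => rw [fjpRem, fjpRem, h 0, ih (fun i => h (i+1))]

lemma fjpRem_erase {d : List (Int × List Int)} {u : Nat → Bool} {j : Nat}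
    (hj : j < d.length) (hu : u j = false) (hnd : (d.map Prod.fst).Nodup) :
    (fjpRem d u).filter (fun p => !(p.1 == (d.getD j (0, [])).1)) =
      fjpRem d (fun i => if i = j then true else u i) := by
  induction d generalizing u j with
  | nil => simp at hj
  | cons x t ih =>
    simp only [List.map_cons, List.nodup_cons] at hnd
    cases j with
    | zero =>
      rw [fjpRem, fjpRem, List.filter_append]
      simp only [List.getD_cons_zero, hu, Bool.false_eq_true, if_false, if_true,
        Nat.succ_ne_zero, List.filter_cons, beq_self_eq_true, Bool.not_true, List.nil_append]
      simp only [List.filter_nil, List.nil_append]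
      rw [List.filter_eq_self]
      intro p hp
      have hpt := fjpRem_mem hp
      have : p.1 ∈ List.map Prod.fst t := List.mem_map_of_mem hpt
      simp only [Bool.not_eq_true', beq_eq_false_iff_ne, ne_eq]
      intro hpe; exact hnd.1 (hpe ▸ this)
    | succ i =>
      have hit : i < t.length := by simpa using hj
      rw [fjpRem, fjpRem, List.filter_append]
      have hen : (x :: t).getD (i+1) (0, []) = t.getD i (0, []) := by
        simp [List.getD_cons_succ]
      rw [hen, if_neg (by omega : ¬((0:Nat) = i + 1))]
      have hti : t.getD i (0, []) ∈ t := by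
        rw [List.getD_eq_getElem _ _ hit]; exact List.getElem_mem _
      have hne : x.1 ≠ (t.getD i (0, [])).1 := by
        intro he; exact hnd.1 (he ▸ List.mem_map_of_mem hti)
      have hbe : (x.1 == (t.getD i (0, [])).1) = false := beq_eq_false_iff_ne.2 hne
      have hx : List.filter (fun p => !(p.1 == (t.getD i (0, [])).1)) (if u 0 then [] else [x])
          = (if u 0 then [] else [x]) := by
        split
        · rfl
        · simp only [List.filter_cons, Bool.not_eq_true', hbe]
          simp [List.getD] at hne
          simp [hne]
      rw [hx]
      congr 1
      rw [ih hit (by simpa using hu) hnd.2]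
      exact fjpRem_congr (by intro i'; simp)

lemma fjpRem_len_flip {d : List (Int × List Int)} {u : Nat → Bool} {j : Nat}
    (hj : j < d.length) (hu : u j = false) :
    (fjpRem d (fun i => if i = j then true else u i)).length + 1 = (fjpRem d u).length := by
  induction d generalizing u j with
  | nil => simp at hj
  | cons x t ih =>
    cases j with
    | zero =>
      rw [fjpRem, fjpRem]
      simp only [hu, Bool.false_eq_true, if_false, if_true, List.length_append, List.nil_append]
      have := fjpRem_congr (d := t) (u := fun i => if i + 1 = 0 then true else u (i+1))
        (u' := fun i => u (i+1)) (by intro i; simp)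
      rw [this]; simp [Nat.add_comm]
    | succ i =>
      rw [fjpRem, fjpRem]
      rw [if_neg (by omega : ¬((0:Nat) = i + 1))]
      simp only [List.length_append]
      have h1 := ih (u := fun i' => u (i'+1)) (j := i) (by simpa using hj) (by simpa using hu)
      have h2 : fjpRem t (fun i' => if i' + 1 = i + 1 then true else u (i'+1))
          = fjpRem t (fun i' => if i' = i then true else u (i'+1)) :=
        fjpRem_congr (by intro i'; simp)
      have h1' : (fjpRem t fun i' => if i' = i then true else u (i' + 1)).length + 1
          = (fjpRem t fun i' => u (i' + 1)).length := h1
      rw [h2]; omega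

lemma fjpFind_rem (cur : PySem.Set Int) (d : List (Int × List Int)) (u : Nat → Bool) :
    fjpFind cur (fjpRem d u) =
      (fjpFirstIdx d u (fun e => fjpShares cur e)).map (fun j => d.getD j (0, [])) := by
  induction d generalizing u with
  | nil => rfl
  | cons x t ih =>
    obtain ⟨en, e⟩ := x
    rw [fjpRem, fjpFirstIdx]
    by_cases h0 : u 0 = true
    · simp only [h0, if_true, List.nil_append]
      rw [if_neg (by simp [h0])]
      rw [ih]
      cases fjpFirstIdx t (fun j => u (j + 1)) (fun e => fjpShares cur e) <;> simp
    · simp only [Bool.not_eq_true] at h0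
      rw [if_neg (show ¬(u 0 = true) by simp [h0])]
      by_cases hp : fjpShares cur (en, e).2 = true
      · rw [if_pos (show u 0 = false ∧ fjpShares cur (en, e).2 = true from ⟨h0, hp⟩)]
        simp only [h0, Bool.false_eq_true, if_false, List.cons_append, List.nil_append]
        rw [fjpFind]
        simp [hp]
      · rw [if_neg (fun hc => hp hc.2)]
        simp only [h0, Bool.false_eq_true, if_false, List.cons_append, List.nil_append]
        rw [fjpFind]
        simp only [hp, Bool.false_eq_true, if_false]
        rw [ih]
        cases fjpFirstIdx t (fun j => u (j + 1)) (fun e => fjpShares cur e) <;> simp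

lemma fjpFirstIdx_none {d : List (Int × List Int)} {u : Nat → Bool} {p : List Int → Bool} :
    fjpFirstIdx d u p = none ↔
      ∀ j, j < d.length → ¬(u j = false ∧ p (d.getD j (0, [])).2 = true) := by
  induction d generalizing u with
  | nil => simp [fjpFirstIdx]
  | cons x t ih =>
    rw [fjpFirstIdx]
    by_cases hx : u 0 = false ∧ p x.2 = true
    · simp only [hx, if_true]
      constructor
      · intro h; cases h
      · intro h; exact absurd hx (h 0 (by simp) )
    · rw [if_neg hx]
      simp only [Option.map_eq_none_iff, ih]
      constructor
      · intro h j hj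
        cases j with
        | zero => simpa using hx
        | succ i => exact h i (by simpa using hj)
      · intro h i hi
        exact h (i + 1) (by simpa using hi)

lemma fjpFirstIdx_some {d : List (Int × List Int)} {u : Nat → Bool} {p : List Int → Bool} {j : Nat}
    (h : fjpFirstIdx d u p = some j) :
    j < d.length ∧ u j = false ∧ p (d.getD j (0, [])).2 = true ∧
      ∀ i, i < j → ¬(u i = false ∧ p (d.getD i (0, [])).2 = true) := by
  induction d generalizing u j with
  | nil => cases h
  | cons x t ih =>
    rw [fjpFirstIdx] at h
    by_cases hx : u 0 = false ∧ p x.2 = true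
    · rw [if_pos hx] at h
      cases h
      exact ⟨by simp, hx.1, hx.2, by intro i hi; omega⟩
    · rw [if_neg hx] at h
      rcases Option.map_eq_some_iff.1 h with ⟨i, hi, rfl⟩
      obtain ⟨h1, h2, h3, h4⟩ := ih hi
      refine ⟨by simpa using h1, h2, h3, ?_⟩
      intro i' hi'
      cases i' with
      | zero => simpa using hx
      | succ i'' => exact h4 i'' (by omega)

lemma fjpBuild_flat (d : List (Int × List Int)) :
    fjpBuildIdx d =
      ((List.range d.length).flatMap (fun i => ((d.getD i (0, [])).2).map (fun v => (v, i)))).foldl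
        (fun dd p => dd.modify p.1 [] (· ++ [p.2])) PySem.Dict.empty := by
  rw [fjpBuildIdx]
  generalize (List.range d.length) = L
  suffices h : ∀ (L : List Nat) (dd : PySem.Dict Int (List Nat)),
      L.foldl (fun dd i => ((d.getD i (0, [])).2).foldl
        (fun dd v => dd.modify v [] (· ++ [i])) dd) dd =
      (L.flatMap (fun i => ((d.getD i (0, [])).2).map (fun v => (v, i)))).foldl
        (fun dd p => dd.modify p.1 [] (· ++ [p.2])) dd by
    exact h L _
  intro L
  induction L with
  | nil => intro dd; rfl
  | cons i L ih =>
    intro dd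
    rw [List.foldl_cons, List.flatMap_cons, List.foldl_append, ih, List.foldl_map]

lemma fjpBuildIdx_mem (d : List (Int × List Int)) (v : Int) (j : Nat) :
    j ∈ (fjpBuildIdx d).getD v [] ↔ j < d.length ∧ v ∈ (d.getD j (0, [])).2 := by
  rw [fjpBuild_flat, PySem.Dict.getD_foldl_modify_append]
  simp only [PySem.Dict.getD_empty, List.nil_append]
  constructor
  · intro hmem
    rcases List.mem_map.1 hmem with ⟨⟨w, i⟩, hin, rfl⟩
    rcases List.mem_filter.1 hin with ⟨hfl, hw⟩
    rcases List.mem_flatMap.1 hfl with ⟨i', hi', hmm⟩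
    rcases List.mem_map.1 hmm with ⟨v', hv', he⟩
    cases he
    simp only [beq_iff_eq] at hw
    exact ⟨List.mem_range.1 hi', hw ▸ hv'⟩
  · rintro ⟨hj, hv⟩
    refine List.mem_map.2 ⟨(v, j), List.mem_filter.2 ⟨List.mem_flatMap.2 ⟨j, List.mem_range.2 hj, ?_⟩, by simp⟩, rfl⟩
    exact List.mem_map.2 ⟨v, hv, rfl⟩

lemma fjpGetD_set (l : List Nat) (p a x : Nat) (hp : p < l.length) :
    (l.set p a).getD x 0 = if x = p then a else l.getD x 0 := by
  simp only [List.getD, List.getElem?_set]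
  by_cases h : x = p
  · subst h; simp [hp]
  · rw [if_neg (fun hc => h hc.symm), if_neg h]

lemma fjpScan_some (state : List Nat) (j0 : Nat) (hj0 : j0 < state.length)
    (h1 : state.getD j0 0 = 1) (hmin : ∀ i, i < j0 → state.getD i 0 ≠ 1) :
    ∀ lo, lo ≤ j0 → fjpScan state lo = some j0 := by
  have H : ∀ n lo, lo ≤ j0 → j0 - lo ≤ n → fjpScan state lo = some j0 := by
    intro n
    induction n with
    | zero =>
      intro lo hle hn
      have : lo = j0 := by omega
      subst this
      rw [fjpScan, dif_pos hj0, if_pos h1]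
    | succ n ih =>
      intro lo hle hn
      by_cases he : lo = j0
      · subst he; rw [fjpScan, dif_pos hj0, if_pos h1]
      · have hlt : lo < j0 := by omega
        have hll : lo < state.length := by omega
        rw [fjpScan, dif_pos hll, if_neg (hmin lo hlt)]
        exact ih (lo + 1) (by omega) (by omega)
  exact fun lo hle => H j0 lo hle (by omega)

lemma fjpScan_none (state : List Nat)
    (h : ∀ j, j < state.length → state.getD j 0 ≠ 1) :
    ∀ lo, fjpScan state lo = none := by
  have H : ∀ n lo, state.length - lo ≤ n → fjpScan state lo = none := by
    intro n
    induction n with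
    | zero =>
      intro lo hn
      rw [fjpScan, dif_neg (by omega)]
    | succ n ih =>
      intro lo hn
      by_cases hl : lo < state.length
      · rw [fjpScan, dif_pos hl, if_neg (h lo hl)]
        exact ih (lo + 1) (by omega)
      · rw [fjpScan, dif_neg hl]
  exact fun lo => H (state.length - lo) lo (by omega)

-- proof-side names for B's inner loops (definitionally the code in fjpAbsorb)
def fjpMark (ps : List Nat) (sl : List Nat × Nat) : List Nat × Nat :=
  ps.foldl
    (fun sl p =>
      if sl.1.getD p 0 = 0 then (sl.1.set p 1, if p < sl.2 then p else sl.2) else sl)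
    sl

def fjpAbs2 (v2p : PySem.Dict Int (List Nat)) (vs : List Int)
    (s : PySem.Set Int × List Nat × Nat) : PySem.Set Int × List Nat × Nat :=
  vs.foldl
    (fun sr v =>
      if PySem.Set.contains sr.1 v then sr
      else (PySem.Set.add sr.1 v, fjpMark (v2p.getD v []) sr.2))
    s

lemma fjpAbsorb_eq (v2p : PySem.Dict Int (List Nat)) (items : List (Int × List Int))
    (sr : PySem.Set Int × List Nat × Nat) (i : Nat) :
    fjpAbsorb v2p items sr i = fjpAbs2 v2p ((items.getD i (0, [])).2) sr := rfl

lemma fjpMark_spec (ps : List Nat) :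
    ∀ (state : List Nat) (lo : Nat), (∀ p ∈ ps, p < state.length) →
    (∀ x, (fjpMark ps (state, lo)).1.getD x 0 =
        if state.getD x 0 = 0 ∧ x ∈ ps then 1 else state.getD x 0) ∧
    (fjpMark ps (state, lo)).1.length = state.length ∧
    (fjpMark ps (state, lo)).2 ≤ lo ∧
    (∀ p, state.getD p 0 = 0 → p ∈ ps → (fjpMark ps (state, lo)).2 ≤ p) := by
  induction ps with
  | nil =>
    intro state lo _
    refine ⟨fun x => ?_, rfl, le_refl _, fun p _ hp => absurd hp (List.not_mem_nil)⟩
    simp [fjpMark]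
  | cons p0 ps ih =>
    intro state lo hps
    have hp0 : p0 < state.length := hps p0 List.mem_cons_self
    by_cases h0 : state.getD p0 0 = 0
    · have hstep : fjpMark (p0 :: ps) (state, lo)
          = fjpMark ps (state.set p0 1, if p0 < lo then p0 else lo) := by
        rw [fjpMark, List.foldl_cons, if_pos h0]; rfl
      have hps' : ∀ p ∈ ps, p < (state.set p0 1).length := by
        intro p hp; rw [List.length_set]; exact hps p (List.mem_cons_of_mem _ hp)
      obtain ⟨ia, ib, ic, id⟩ := ih (state.set p0 1) (if p0 < lo then p0 else lo) hps'
      have hget : ∀ x, (state.set p0 1).getD x 0 = if x = p0 then 1 else state.getD x 0 :=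
        fun x => fjpGetD_set state p0 1 x hp0
      have hlo' : (if p0 < lo then p0 else lo) ≤ lo := by split <;> omega
      have hlop0 : (if p0 < lo then p0 else lo) ≤ p0 := by split <;> omega
      refine ⟨fun x => ?_, by rw [hstep, ib, List.length_set], ?_, ?_⟩
      · rw [hstep, ia x, hget x]
        by_cases hx : x = p0
        · subst hx
          rw [if_pos rfl]
          simp only [one_ne_zero, false_and, if_false]
          rw [if_pos ⟨h0, List.mem_cons_self⟩]
        · rw [if_neg hx]
          by_cases hc : state.getD x 0 = 0 ∧ x ∈ ps
          · rw [if_pos hc, if_pos ⟨hc.1, List.mem_cons_of_mem _ hc.2⟩]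
          · rw [if_neg hc, if_neg ?_]
            rintro ⟨hc1, hc2⟩
            rcases List.mem_cons.1 hc2 with rfl | hc2
            · exact hx rfl
            · exact hc ⟨hc1, hc2⟩
      · rw [hstep]; exact le_trans ic hlo'
      · intro p hpz hpm
        rw [hstep]
        rcases List.mem_cons.1 hpm with rfl | hpm
        · exact le_trans ic hlop0
        · by_cases hpe : p = p0
          · subst hpe; exact le_trans ic hlop0
          · refine id p ?_ hpm
            rw [hget p, if_neg hpe]; exact hpz
    · have hstep : fjpMark (p0 :: ps) (state, lo) = fjpMark ps (state, lo) := by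
        rw [fjpMark, List.foldl_cons, if_neg h0]; rfl
      obtain ⟨ia, ib, ic, id⟩ := ih state lo (fun p hp => hps p (List.mem_cons_of_mem _ hp))
      refine ⟨fun x => ?_, by rw [hstep, ib], by rw [hstep]; exact ic, ?_⟩
      · rw [hstep, ia x]
        by_cases hc : state.getD x 0 = 0 ∧ x ∈ ps
        · rw [if_pos hc, if_pos ⟨hc.1, List.mem_cons_of_mem _ hc.2⟩]
        · rw [if_neg hc, if_neg ?_]
          rintro ⟨hc1, hc2⟩
          rcases List.mem_cons.1 hc2 with rfl | hc2
          · exact h0 hc1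
          · exact hc ⟨hc1, hc2⟩
      · intro p hpz hpm
        rw [hstep]
        rcases List.mem_cons.1 hpm with rfl | hpm
        · exact absurd hpz h0
        · exact id p hpz hpm

lemma fjpAbs2_spec (v2p : PySem.Dict Int (List Nat)) (vs : List Int) :
    ∀ (seen : PySem.Set Int) (state : List Nat) (lo : Nat),
    (∀ (v : Int) (p : Nat), p ∈ v2p.getD v [] → p < state.length) →
    (∀ v, v ∈ (fjpAbs2 v2p vs (seen, state, lo)).1 ↔ v ∈ seen ∨ v ∈ vs) ∧
    (∀ x, (fjpAbs2 v2p vs (seen, state, lo)).2.1.getD x 0 =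
        if state.getD x 0 = 0 ∧ ∃ v, v ∈ vs ∧ v ∉ seen ∧ x ∈ v2p.getD v []
        then 1 else state.getD x 0) ∧
    (fjpAbs2 v2p vs (seen, state, lo)).2.1.length = state.length ∧
    (fjpAbs2 v2p vs (seen, state, lo)).2.2 ≤ lo ∧
    (∀ p, state.getD p 0 = 0 →
      (∃ v, v ∈ vs ∧ v ∉ seen ∧ p ∈ v2p.getD v []) →
      (fjpAbs2 v2p vs (seen, state, lo)).2.2 ≤ p) := by
  induction vs with
  | nil =>
    intro seen state lo _
    refine ⟨by simp [fjpAbs2], fun x => ?_, rfl, le_refl _, ?_⟩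
    · rw [if_neg ?_]
      · rfl
      · rintro ⟨_, v, hv, _⟩; exact absurd hv List.not_mem_nil
    · rintro p _ ⟨v, hv, _⟩; exact absurd hv List.not_mem_nil
  | cons w vs ih =>
    intro seen state lo hv2p
    by_cases hw : PySem.Set.contains seen w
    · have hws : w ∈ seen := (PySem.Set.contains_iff _ _).1 hw
      have hstep : fjpAbs2 v2p (w :: vs) (seen, state, lo)
          = fjpAbs2 v2p vs (seen, state, lo) := by
        rw [fjpAbs2, List.foldl_cons, if_pos hw]; rfl
      obtain ⟨ia, ib, ic, id1, id2⟩ := ih seen state lo hv2p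
      refine ⟨fun v => ?_, fun x => ?_, by rw [hstep, ic], by rw [hstep]; exact id1, ?_⟩
      · rw [hstep, ia v]
        constructor
        · rintro (h | h); exacts [Or.inl h, Or.inr (List.mem_cons_of_mem _ h)]
        · rintro (h | h)
          · exact Or.inl h
          · rcases List.mem_cons.1 h with rfl | h
            · exact Or.inl hws
            · exact Or.inr h
      · rw [hstep, ib x]
        by_cases hc : state.getD x 0 = 0 ∧ ∃ v, v ∈ vs ∧ v ∉ seen ∧ x ∈ v2p.getD v []
        · rcases hc.2 with ⟨v, hv1, hv2, hv3⟩
          rw [if_pos hc, if_pos ⟨hc.1, v, List.mem_cons_of_mem _ hv1, hv2, hv3⟩]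
        · rw [if_neg hc, if_neg ?_]
          rintro ⟨h1, v, hv1, hv2, hv3⟩
          rcases List.mem_cons.1 hv1 with rfl | hv1
          · exact hv2 hws
          · exact hc ⟨h1, v, hv1, hv2, hv3⟩
      · rintro p hpz ⟨v, hv1, hv2, hv3⟩
        rw [hstep]
        rcases List.mem_cons.1 hv1 with rfl | hv1
        · exact absurd hws hv2
        · exact id2 p hpz ⟨v, hv1, hv2, hv3⟩
    · have hws : w ∉ seen := fun h => hw ((PySem.Set.contains_iff _ _).2 h)
      have hstep : fjpAbs2 v2p (w :: vs) (seen, state, lo)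
          = fjpAbs2 v2p vs (PySem.Set.add seen w, fjpMark (v2p.getD w []) (state, lo)) := by
        rw [fjpAbs2, List.foldl_cons, if_neg hw]; rfl
      obtain ⟨ma, mb, mc, md⟩ :=
        fjpMark_spec (v2p.getD w []) state lo (fun p hp => hv2p w p hp)
      rcases hmk : fjpMark (v2p.getD w []) (state, lo) with ⟨state1, lo1⟩
      rw [hmk] at ma mb mc md hstep
      simp only at ma mb mc md
      have hv2p' : ∀ (v : Int) (p : Nat), p ∈ v2p.getD v [] → p < state1.length := by
        intro v p hp; rw [mb]; exact hv2p v p hp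
      obtain ⟨ia, ib, ic, id1, id2⟩ := ih (PySem.Set.add seen w) state1 lo1 hv2p'
      refine ⟨fun v => ?_, fun x => ?_, by rw [hstep, ic, mb],
        by rw [hstep]; exact le_trans id1 mc, ?_⟩
      · rw [hstep, ia v, PySem.Set.mem_add]
        constructor
        · rintro ((h | rfl) | h)
          exacts [Or.inl h, Or.inr List.mem_cons_self, Or.inr (List.mem_cons_of_mem _ h)]
        · rintro (h | h)
          · exact Or.inl (Or.inl h)
          · rcases List.mem_cons.1 h with rfl | h
            · exact Or.inl (Or.inr rfl)
            · exact Or.inr h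
      · rw [hstep, ib x]
        by_cases hA : state.getD x 0 = 0 ∧ x ∈ v2p.getD w []
        · -- freshly marked by w's positions
          have hsx : state1.getD x 0 = 1 := by rw [ma x, if_pos hA]
          rw [hsx]
          rw [if_neg (by rintro ⟨h, -⟩; omega)]
          rw [if_pos ⟨hA.1, w, List.mem_cons_self, hws, hA.2⟩]
        · have hsx : state1.getD x 0 = state.getD x 0 := by rw [ma x, if_neg hA]
          rw [hsx]
          by_cases hz : state.getD x 0 = 0
          · have hxw : x ∉ v2p.getD w [] := fun hc => hA ⟨hz, hc⟩
            by_cases hc : ∃ v, v ∈ vs ∧ v ∉ PySem.Set.add seen w ∧ x ∈ v2p.getD v []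
            · rcases hc with ⟨v, hv1, hv2, hv3⟩
              have hv2' : v ∉ seen := fun hs => hv2 ((PySem.Set.mem_add _ _ _).2 (Or.inl hs))
              rw [if_pos ⟨hz, v, hv1, hv2, hv3⟩,
                if_pos ⟨hz, v, List.mem_cons_of_mem _ hv1, hv2', hv3⟩]
            · rw [if_neg (fun hc2 => hc hc2.2), if_neg ?_]
              rintro ⟨h1, v, hv1, hv2, hv3⟩
              rcases List.mem_cons.1 hv1 with rfl | hv1
              · exact hxw hv3
              · by_cases hvw : v = w
                · exact hxw (hvw ▸ hv3)
                · refine hc ⟨v, hv1, ?_, hv3⟩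
                  rw [PySem.Set.mem_add]
                  rintro (h | h); exacts [hv2 h, hvw h]
          · rw [if_neg (fun hc => hz hc.1), if_neg (fun hc => hz hc.1)]
      · rintro p hpz ⟨v, hv1, hv2, hv3⟩
        rw [hstep]
        rcases List.mem_cons.1 hv1 with rfl | hv1
        · exact le_trans id1 (md p hpz hv3)
        · by_cases hpw : p ∈ v2p.getD w []
          · exact le_trans id1 (md p hpz hpw)
          · by_cases hvw : v = w
            · exact absurd (hvw ▸ hv3) hpw
            · refine id2 p ?_ ⟨v, hv1, ?_, hv3⟩
              · rw [ma p, if_neg (fun hc => hpw hc.2)]; exact hpz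
              · rw [PySem.Set.mem_add]
                rintro (h | h); exacts [hv2 h, hvw h]

lemma fjp_main (d : List (Int × List Int)) (hnd : (d.map Prod.fst).Nodup)
    (v2p : PySem.Dict Int (List Nat)) (hidx : v2p = fjpBuildIdx d) :
    ∀ (k : Nat) (state : List Nat) (lo : Nat) (cur seen : PySem.Set Int)
      (path : List Int) (working : PySem.Dict Int (List Int)),
      working.items = fjpRem d (fun j => state.getD j 0 == 2) →
      state.length = d.length →
      (∀ v, v ∈ cur ↔ v ∈ seen) →
      (∀ j, j < d.length →
        (state.getD j 0 = 1 ↔ (state.getD j 0 ≠ 2 ∧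
          ∃ v, v ∈ (d.getD j (0, [])).2 ∧ v ∈ seen))) →
      (∀ j, state.getD j 0 = 0 ∨ state.getD j 0 = 1 ∨ state.getD j 0 = 2) →
      (∀ p, p < lo → state.getD p 0 ≠ 1) →
      k = (fjpRem d (fun j => state.getD j 0 == 2)).length →
      fjpLoopA k working cur path = fjpLoopB v2p d k seen state lo path := by
  have hv2p : ∀ (v : Int) (p : Nat), p ∈ v2p.getD v [] → p < d.length := by
    intro v p hp; rw [hidx] at hp; exact ((fjpBuildIdx_mem d v p).1 hp).1
  intro k
  induction k with
  | zero => intro state lo cur seen path working _ _ _ _ _ _ _; rfl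
  | succ k ih =>
    intro state lo cur seen path working hw hlen hcur hready hval hlo hk
    have hsz : working.size ≠ 0 := by
      rw [PySem.Dict.size, hw, ← hk]; omega
    cases hfi : fjpFirstIdx d (fun j => state.getD j 0 == 2)
        (fun e => fjpShares cur e) with
    | none =>
      -- stuck: Python raises on both sides; both ports return the path built so far
      have hn1 : ∀ j, j < state.length → state.getD j 0 ≠ 1 := by
        intro j hj h1
        refine fjpFirstIdx_none.1 hfi j (hlen ▸ hj) ⟨?_, ?_⟩
        · rw [beq_eq_false_iff_ne, h1]; omega
        · obtain ⟨_, v, hv1, hv2⟩ := (hready j (hlen ▸ hj)).1 h1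
          exact (fjpShares_iff cur _).2 ⟨v, hv1, (hcur v).2 hv2⟩
      rw [fjpLoopA, if_neg hsz, fjpLoopB, hw, fjpFind_rem, hfi, fjpScan_none state hn1 lo]
      rfl
    | some j0 =>
      obtain ⟨hj0, hu0, hp0, hminimal⟩ := fjpFirstIdx_some hfi
      have hj0s : j0 < state.length := hlen ▸ hj0
      have hne2 : state.getD j0 0 ≠ 2 := by
        intro h; rw [beq_eq_false_iff_ne] at hu0; exact hu0 h
      have hj01 : state.getD j0 0 = 1 := by
        refine (hready j0 hj0).2 ⟨hne2, ?_⟩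
        rcases (fjpShares_iff cur _).1 hp0 with ⟨v, hv1, hv2⟩
        exact ⟨v, hv1, (hcur v).1 hv2⟩
      have hminS : ∀ i, i < j0 → state.getD i 0 ≠ 1 := by
        intro i hi h1
        refine hminimal i hi ⟨?_, ?_⟩
        · rw [beq_eq_false_iff_ne, h1]; omega
        · obtain ⟨_, v, hv1, hv2⟩ := (hready i (by omega)).1 h1
          exact (fjpShares_iff cur _).2 ⟨v, hv1, (hcur v).2 hv2⟩
      have hloj0 : lo ≤ j0 := by
        by_contra hc
        exact hlo j0 (by omega) hj01
      have hscan : fjpScan state lo = some j0 :=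
        fjpScan_some state j0 hj0s hj01 hminS lo hloj0
      rcases hde : d.getD j0 (0, []) with ⟨en, e⟩
      have hfind : fjpFind cur working.items = some (en, e) := by
        rw [hw, fjpFind_rem, hfi, Option.map_some, hde]
      have stepA : fjpLoopA (k + 1) working cur path
          = fjpLoopA k (working.erase en)
              (PySem.Set.union cur (PySem.Set.ofList e)) (path ++ [en]) := by
        rw [fjpLoopA, if_neg hsz, hfind]
      have stepB : fjpLoopB v2p d (k + 1) seen state lo path
          = fjpLoopB v2p d k
              (fjpAbsorb v2p d (seen, state.set j0 2, j0 + 1) j0).1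
              (fjpAbsorb v2p d (seen, state.set j0 2, j0 + 1) j0).2.1
              (fjpAbsorb v2p d (seen, state.set j0 2, j0 + 1) j0).2.2
              (path ++ [(d.getD j0 (0, [])).1]) := by
        rw [fjpLoopB, hscan]
      have habs : fjpAbsorb v2p d (seen, state.set j0 2, j0 + 1) j0
          = fjpAbs2 v2p e (seen, state.set j0 2, j0 + 1) := by
        rw [fjpAbsorb_eq, hde]
      rw [stepA, stepB, hde, habs]
      -- the marked state after set + absorb
      have hget1 : ∀ x, (state.set j0 2).getD x 0 = if x = j0 then 2 else state.getD x 0 :=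
        fun x => fjpGetD_set state j0 2 x hj0s
      have hv2p1 : ∀ (v : Int) (p : Nat), p ∈ v2p.getD v [] → p < (state.set j0 2).length := by
        intro v p hp; rw [List.length_set, hlen]; exact hv2p v p hp
      obtain ⟨aa, ab, ac, ad1, ad2⟩ := fjpAbs2_spec v2p e seen (state.set j0 2) (j0 + 1) hv2p1
      set r := fjpAbs2 v2p e (seen, state.set j0 2, j0 + 1) with hr
      -- the new mask agrees with the flipped old mask
      have hmask : ∀ j, (r.2.1.getD j 0 == 2)
          = (if j = j0 then true else state.getD j 0 == 2) := by
        intro j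
        rw [ab j, hget1 j]
        by_cases hj : j = j0
        · subst hj; simp
        · rw [if_neg hj, if_neg hj]
          split
          · rename_i hcnd
            rw [hcnd.1]
            rfl
          · rfl
      have herase : (working.erase en).items = fjpRem d (fun j => r.2.1.getD j 0 == 2) := by
        have h1 : (working.erase en).items =
            (fjpRem d (fun j => state.getD j 0 == 2)).filter (fun p => !(p.1 == en)) := by
          simp [PySem.Dict.erase, hw]
        rw [h1, show en = (d.getD j0 (0, [])).1 by rw [hde]]
        rw [fjpRem_erase hj0 hu0 hnd]
        exact fjpRem_congr (fun i => (hmask i).symm)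
      have hflen : k = (fjpRem d (fun j => r.2.1.getD j 0 == 2)).length := by
        have h2 : fjpRem d (fun j => r.2.1.getD j 0 == 2) =
            fjpRem d (fun i => if i = j0 then true else state.getD i 0 == 2) :=
          fjpRem_congr hmask
        have h3 := fjpRem_len_flip (d := d) (u := fun j => state.getD j 0 == 2) hj0 hu0
        have h3' : (fjpRem d (fun i => if i = j0 then true else state.getD i 0 == 2)).length + 1
            = (fjpRem d (fun j => state.getD j 0 == 2)).length := h3
        rw [h2]; omega
      refine ih r.2.1 r.2.2 (PySem.Set.union cur (PySem.Set.ofList e)) r.1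
        (path ++ [en]) (working.erase en) herase (by rw [ac, List.length_set, hlen]) ?_ ?_ ?_ ?_ hflen
      · intro v
        rw [PySem.Set.mem_union, PySem.Set.mem_ofList, aa v]
        have := hcur v
        tauto
      · intro j hjd
        rw [ab j]
        constructor
        · intro h1
          by_cases hcnd : (state.set j0 2).getD j 0 = 0 ∧
              ∃ v, v ∈ e ∧ v ∉ seen ∧ j ∈ v2p.getD v []
          · rcases hcnd.2 with ⟨v, hv1, _, hv3⟩
            rw [hidx] at hv3
            obtain ⟨_, hvd⟩ := (fjpBuildIdx_mem d v j).1 hv3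
            rw [if_pos hcnd] at h1 ⊢
            exact ⟨by omega, v, hvd, (aa v).2 (Or.inr hv1)⟩
          · rw [if_neg hcnd] at h1 ⊢
            rw [hget1 j] at h1
            have hjne : j ≠ j0 := by
              intro hc; rw [if_pos hc] at h1; omega
            rw [if_neg hjne] at h1
            obtain ⟨h2, v, hv1, hv2⟩ := (hready j hjd).1 h1
            refine ⟨?_, v, hv1, (aa v).2 (Or.inl hv2)⟩
            rw [hget1 j, if_neg hjne]; exact h2
        · rintro ⟨h2, v, hv1, hv2⟩
          have hs1ne2 : (state.set j0 2).getD j 0 ≠ 2 := by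
            intro hc
            by_cases hcnd : (state.set j0 2).getD j 0 = 0 ∧
                ∃ v, v ∈ e ∧ v ∉ seen ∧ j ∈ v2p.getD v []
            · rw [if_pos hcnd] at h2; omega
            · rw [if_neg hcnd, hc] at h2; omega
          have hjne : j ≠ j0 := by
            intro hc; rw [hget1 j, if_pos hc] at hs1ne2; omega
          have hsj : (state.set j0 2).getD j 0 = state.getD j 0 := by
            rw [hget1 j, if_neg hjne]
          rcases (aa v).1 hv2 with hvs | hve
          · have h1 : state.getD j 0 = 1 :=
              (hready j hjd).2 ⟨by rw [← hsj]; exact hs1ne2, v, hv1, hvs⟩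
            rw [if_neg ?_, hsj]
            · exact h1
            · rintro ⟨hc, _⟩; rw [hsj, h1] at hc; omega
          · by_cases hvseen : v ∈ seen
            · have h1 : state.getD j 0 = 1 :=
                (hready j hjd).2 ⟨by rw [← hsj]; exact hs1ne2, v, hv1, hvseen⟩
              rw [if_neg ?_, hsj]
              · exact h1
              · rintro ⟨hc, _⟩; rw [hsj, h1] at hc; omega
            · have hvj : j ∈ v2p.getD v [] := by
                rw [hidx]; exact (fjpBuildIdx_mem d v j).2 ⟨hjd, hv1⟩
              rcases hval j with h0 | h1 | h2'
              · rw [if_pos ⟨by rw [hsj]; exact h0, v, hve, hvseen, hvj⟩]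
              · rw [if_neg ?_, hsj]
                · exact h1
                · rintro ⟨hc, _⟩; rw [hsj, h1] at hc; omega
              · exact absurd (hsj ▸ h2') hs1ne2
      · intro j
        rw [ab j, hget1 j]
        by_cases hj : j = j0
        · rw [if_pos hj]
          split
          · omega
          · omega
        · rw [if_neg hj]
          split
          · omega
          · exact hval j
      · intro p hp
        have hplo : p < j0 + 1 := by
          have := ad1; omega
        have hbase : (state.set j0 2).getD p 0 ≠ 1 := by
          rw [hget1 p]
          by_cases hpj : p = j0
          · rw [if_pos hpj]; omega
          · rw [if_neg hpj]
            exact hminS p (by omega)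
        rw [ab p]
        by_cases hcnd : (state.set j0 2).getD p 0 = 0 ∧
            ∃ v, v ∈ e ∧ v ∉ seen ∧ p ∈ v2p.getD v []
        · exact absurd hp (by have := ad2 p hcnd.1 hcnd.2; omega)
        · rw [if_neg hcnd]; exact hbase

lemma fjp_ports_eq (cm : List (Int × List Int)) :
    find_join_path cm = find_join_path_alt cm := by
  have hnd : (((PySem.Dict.ofList cm).items).map Prod.fst).Nodup :=
    PySem.Dict.nodup_keys_ofList cm
  rw [find_join_path, find_join_path_alt]
  cases hd : (PySem.Dict.ofList cm).items with
  | nil =>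
    have hk : (PySem.Dict.ofList cm).keys = [] := by simp [PySem.Dict.keys, hd]
    rw [hk]
  | cons x t =>
    obtain ⟨k0, e0⟩ := x
    rw [hd] at hnd
    simp only [List.map_cons, List.nodup_cons] at hnd
    have hk : (PySem.Dict.ofList cm).keys = k0 :: t.map Prod.fst := by
      simp [PySem.Dict.keys, hd]
    have hget : (PySem.Dict.ofList cm).get? k0 = some e0 := by
      simp [PySem.Dict.get?, hd]
    set d : List (Int × List Int) := (k0, e0) :: t with hdd
    set n : Nat := d.length with hn
    set v2p : PySem.Dict Int (List Nat) := fjpBuildIdx d with hv2pd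
    have hv2p : ∀ (v : Int) (p : Nat), p ∈ v2p.getD v [] → p < d.length := by
      intro v p hp; rw [hv2pd] at hp; exact ((fjpBuildIdx_mem d v p).1 hp).1
    set state0 : List Nat := (List.replicate n 0).set 0 2 with hs0
    have hlen0 : state0.length = n := by rw [hs0, List.length_set, List.length_replicate]
    have hget0 : ∀ j, state0.getD j 0 = if j = 0 then 2 else 0 := by
      intro j
      rw [hs0, fjpGetD_set _ 0 2 j (by rw [List.length_replicate, hn, hdd]; simp)]
      by_cases hj : j = 0
      · rw [if_pos hj, if_pos hj]
      · rw [if_neg hj, if_neg hj, List.getD]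
        cases hq : (List.replicate n 0)[j]? with
        | none => rfl
        | some b =>
          have := List.mem_replicate.1 (List.mem_of_getElem? hq)
          simp [this.2]
    have hv2p0 : ∀ (v : Int) (p : Nat), p ∈ v2p.getD v [] → p < state0.length := by
      intro v p hp; rw [hlen0, hn]; exact hv2p v p hp
    obtain ⟨aa, ab, ac, ad1, ad2⟩ := fjpAbs2_spec v2p e0 PySem.Set.empty state0 n hv2p0
    have habs : fjpAbsorb v2p d (PySem.Set.empty, state0, n) 0
        = fjpAbs2 v2p e0 (PySem.Set.empty, state0, n) := by
      rw [fjpAbsorb_eq]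
      simp [hdd]
    set r := fjpAbs2 v2p e0 (PySem.Set.empty, state0, n) with hr
    have hmask0 : ∀ j, (r.2.1.getD j 0 == 2) = (if j = 0 then true else false) := by
      intro j
      rw [ab j, hget0 j]
      by_cases hj : j = 0
      · subst hj; simp
      · rw [if_neg hj, if_neg hj]
        split <;> rfl
    have ht : fjpRem d (fun j => r.2.1.getD j 0 == 2) = t := by
      rw [fjpRem_congr hmask0, hdd, fjpRem]
      have : ∀ i, (fun i => if i + 1 = 0 then true else false) i = (fun _ => false) i := by
        intro i; simp
      rw [fjpRem_congr this, fjpRem_false]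
      simp
    have herase : ((PySem.Dict.ofList cm).erase k0).items
        = fjpRem d (fun j => r.2.1.getD j 0 == 2) := by
      rw [ht]
      simp only [PySem.Dict.erase, hd, hdd, List.filter_cons, beq_self_eq_true, Bool.not_true,
        Bool.false_eq_true, if_false]
      rw [List.filter_eq_self]
      intro p hp
      simp only [Bool.not_eq_true', beq_eq_false_iff_ne, ne_eq]
      intro he; exact hnd.1 (he ▸ List.mem_map_of_mem hp)
    have hsz : ((PySem.Dict.ofList cm).erase k0).size = t.length := by
      rw [PySem.Dict.size, herase, ht]
    have hndd : (d.map Prod.fst).Nodup := by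
      rw [hdd]; simp [hnd.1, hnd.2]
    have hmain := fjp_main d hndd v2p hv2pd t.length r.2.1 r.2.2
      (PySem.Set.ofList e0) r.1 [k0] ((PySem.Dict.ofList cm).erase k0)
      herase (by rw [ac, hlen0, hn])
      (by
        intro v
        rw [PySem.Set.mem_ofList, aa v]
        simp [PySem.Set.empty])
      (by
        intro j hjd
        rw [ab j]
        constructor
        · intro h1
          by_cases hcnd : state0.getD j 0 = 0 ∧
              ∃ v, v ∈ e0 ∧ v ∉ PySem.Set.empty ∧ j ∈ v2p.getD v []
          · rcases hcnd.2 with ⟨v, hv1, _, hv3⟩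
            rw [hv2pd] at hv3
            obtain ⟨_, hvd⟩ := (fjpBuildIdx_mem d v j).1 hv3
            rw [if_pos hcnd] at h1 ⊢
            exact ⟨by omega, v, hvd, (aa v).2 (Or.inr hv1)⟩
          · rw [if_neg hcnd] at h1
            rw [hget0 j] at h1
            split at h1 <;> omega
        · rintro ⟨h2, v, hv1, hv2⟩
          have hve : v ∈ e0 := by
            rcases (aa v).1 hv2 with h | h
            · simp [PySem.Set.empty] at h
            · exact h
          have hj0 : j ≠ 0 := by
            intro hc
            by_cases hcnd : state0.getD j 0 = 0 ∧
                ∃ v, v ∈ e0 ∧ v ∉ PySem.Set.empty ∧ j ∈ v2p.getD v []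
            · rw [hget0 j, if_pos hc] at hcnd; omega
            · rw [if_neg hcnd, hget0 j, if_pos hc] at h2; omega
          have hvj : j ∈ v2p.getD v [] := by
            rw [hv2pd]; exact (fjpBuildIdx_mem d v j).2 ⟨hjd, hv1⟩
          rw [if_pos ⟨by rw [hget0 j, if_neg hj0], v, hve,
            by simp [PySem.Set.empty], hvj⟩]
      )
      (by
        intro j
        rw [ab j, hget0 j]
        by_cases hj : j = 0
        · rw [if_pos hj]
          split
          · omega
          · omega
        · rw [if_neg hj]
          split
          · omega
          · omega)
      (by
        intro p hp
        have hbase : state0.getD p 0 ≠ 1 := by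
          rw [hget0 p]; split <;> omega
        rw [ab p]
        by_cases hcnd : state0.getD p 0 = 0 ∧
            ∃ v, v ∈ e0 ∧ v ∉ PySem.Set.empty ∧ p ∈ v2p.getD v []
        · exact absurd hp (by have := ad2 p hcnd.1 hcnd.2; omega)
        · rw [if_neg hcnd]; exact hbase)
      (by rw [ht])
    simp only [hk, hget, hsz, hd, hdd, habs, List.length_cons, Nat.add_sub_cancel]
    have hn' : n - 1 = t.length := by rw [hn, hdd]; simp
    simpa [← hdd, hn', habs] using hmain

-- ===== VERDICT (by name: the statement is the Claim_ definition above) =====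
theorem find_join_path_spec : Claim_equal_find_join_path := by
  intro con_cover_map _ _
  unfold Spec_find_join_path
  exact fjp_ports_eq con_cover_map
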